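-- pv_equiv track=rewrite | github.com/frankgama/CS-9-Projects | Morse/treeParse.py | treeExp
-- ===== SOURCE A (Python) =====
-- def treeExp(treeexpression):
--     if isinstance(treeexpression, str):
--         treeexpression = treeexpression.strip()
--         position = -1
--         for char in treeexpression[::-1]:
--             if char == ")":
--                 position += len(treeexpression)
--                 return treeexpression[:position+1]
--             else:
--                 position -= 1
--     return None
-- ===== SOURCE B (Python) =====
-- def treeExp(treeexpression):
--     if isinstance(treeexpression, str):
--         s = treeexpression.strip()
--         last = -1
--         for i, ch in enumerate(s):
--             if ch == ")":
--                 last = i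
--         if last >= 0:
--             return s[:last + 1]
--     return None
-- ===== Notes on version B (the rewrite author's own statement) =====
-- stated objective: alternative
-- what changed: Instead of A's backward scan over the reversed string with a decrementing negative position and an early return, B makes one forward pass recording the index of the most recently seen closing parenthesis and slices once after the loop.
import Mathlib
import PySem

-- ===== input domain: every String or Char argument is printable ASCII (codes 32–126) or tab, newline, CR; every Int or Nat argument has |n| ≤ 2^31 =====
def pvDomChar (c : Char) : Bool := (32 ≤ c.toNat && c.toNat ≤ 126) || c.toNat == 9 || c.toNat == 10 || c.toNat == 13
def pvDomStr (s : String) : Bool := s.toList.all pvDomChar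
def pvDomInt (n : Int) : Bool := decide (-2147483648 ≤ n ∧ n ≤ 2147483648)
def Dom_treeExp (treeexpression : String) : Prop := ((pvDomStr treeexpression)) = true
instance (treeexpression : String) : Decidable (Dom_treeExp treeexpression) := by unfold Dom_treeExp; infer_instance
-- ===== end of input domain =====

-- B: one forward pass recording the index of the most recently seen closing parenthesis and a
-- single slice after the loop, instead of A's backward scan with early return. Same O(n) cost.

-- ===== PORT A =====
-- 'for char in treeexpression[::-1]: …' with early return: structural recursion over the
-- reversed character list, carrying 'position'.
def treeExpLoopA (s : String) : List Char → Int → Option String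
  | [], _ => none
  | c :: rest, position =>
    if c = ')' then
      -- position += len(s); return s[:position+1]
      some (PySem.Str.slice s none (some ((position + (PySem.Str.len s)) + 1)))
    else
      treeExpLoopA s rest (position - 1)

def treeExp (treeexpression : String) : Option String :=
  let s := PySem.Str.strip treeexpression
  treeExpLoopA s s.toList.reverse (-1)

-- ===== PORT B =====
def treeExp_alt (treeexpression : String) : Option String :=
  let s := PySem.Str.strip treeexpression
  let last : Int :=
    (PySem.List.enumerate s.toList 0).foldl
      (fun acc p => if p.2 = ')' then p.1 else acc) (-1)
  if last ≥ 0 then some (PySem.Str.slice s none (some (last + 1))) else none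

-- ===== PRECONDITION & SPEC =====
def Spec_treeExp (treeexpression : String) (out : Option String) : Prop := out = treeExp_alt treeexpression
instance (treeexpression : String) (out : Option String) : Decidable (Spec_treeExp treeexpression out) := by unfold Spec_treeExp; infer_instance

-- ===== CLAIM (what is proved, stated in full; the proofs are below) =====
def Claim_equal_treeExp : Prop := ∀ (treeexpression : String), Dom_treeExp treeexpression → Spec_treeExp treeexpression (treeExp treeexpression)

-- ===== LEMMAS AND PROOFS =====

-- A's loop, generalized: processing suffix l with position = -1 - j returns, when the first ')'
-- of l sits at index k, the slice s[: len s - j - k].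
theorem treeExpLoopA_eq (s : String) (l : List Char) (j : Nat) :
    treeExpLoopA s l (-1 - (j : Int)) =
      Option.map
        (fun k : Nat => PySem.Str.slice s none (some ((PySem.Str.len s) - (j : Int) - (k : Int))))
        (l.findIdx? (fun c => c = ')')) := by
  induction l generalizing j with
  | nil => simp [treeExpLoopA]
  | cons c rest ih =>
    by_cases hc : c = ')'
    · rw [treeExpLoopA, if_pos hc, List.findIdx?_cons, if_pos (by simp [hc])]
      simp only [Option.map_some, Nat.cast_zero]
      congr 2
      ring_nf
    · have h1 : (-1 - (j : Int)) - 1 = -1 - ((j + 1 : Nat) : Int) := by push_cast; ring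
      rw [treeExpLoopA, if_neg hc, h1, ih, List.findIdx?_cons, if_neg (by simp [hc])]
      cases h : rest.findIdx? (fun c => decide (c = ')')) with
      | none => simp
      | some k =>
        simp only [Option.map_some]
        congr 2
        push_cast
        ring_nf

-- B's fold, computed from the right: the last index of ')' in cs, as first ')' of cs.reverse.
theorem foldl_last_eq (cs : List Char) :
    (PySem.List.enumerate cs 0).foldl (fun acc p => if p.2 = ')' then p.1 else acc) (-1) =
      match cs.reverse.findIdx? (fun c => c = ')') with
      | some k => (cs.length : Int) - 1 - (k : Int)
      | none => -1 := by
  induction cs using List.reverseRecOn with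
  | nil => simp [PySem.List.enumerate]
  | append_singleton ds c ih =>
    rw [PySem.List.enumerate_append, List.foldl_append]
    by_cases hc : c = ')'
    · simp [PySem.List.enumerate, hc, List.findIdx?_cons]
    · have e1 : PySem.List.enumerate [c] ((0 : Int) + ds.length) = [((ds.length : Int), c)] := by
        simp [PySem.List.enumerate]
      rw [e1, List.foldl_cons, List.foldl_nil, if_neg hc, ih,
        List.reverse_append, List.reverse_singleton, List.singleton_append,
        List.findIdx?_cons, if_neg (by simp [hc])]
      cases h : ds.reverse.findIdx? (fun c => decide (c = ')')) with
      | none => simp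
      | some k =>
        simp only [Option.map_some, List.length_append, List.length_singleton]
        push_cast
        ring

theorem findIdx?_lt (cs : List Char) (k : Nat)
    (h : cs.findIdx? (fun c => c = ')') = some k) : k < cs.length := by
  have := List.findIdx?_eq_some_iff_findIdx_eq.mp h
  omega

-- ===== VERDICT (by name: the statement is the Claim_ definition above) =====
theorem treeExp_spec : Claim_equal_treeExp := by
  intro t _
  have hA := treeExpLoopA_eq (PySem.Str.strip t) (PySem.Str.strip t).toList.reverse 0
  have hB := foldl_last_eq (PySem.Str.strip t).toList
  simp only [Nat.cast_zero, sub_zero] at hA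
  unfold Spec_treeExp
  simp only [treeExp, treeExp_alt]
  rw [hA, hB]
  set s := PySem.Str.strip t with hs
  cases h : s.toList.reverse.findIdx? (fun c => decide (c = ')')) with
  | none => simp
  | some k =>
    have hk : k < s.toList.length := by
      have := findIdx?_lt s.toList.reverse k h
      simpa using this
    have hge : ((s.toList.length : Int) - 1 - (k : Int)) ≥ 0 := by omega
    have harg : PySem.Str.len s - (k : Int) = ((s.toList.length : Int) - 1 - (k : Int)) + 1 := by
      rw [PySem.Str.len_eq]; ring
    simp only [Option.map_some, if_pos hge, harg]
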